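-- pv_equiv track=rewrite | github.com/Flibielt/Image-processig-project | ocr/src/word_detector.py | get_word_borders
-- ===== SOURCE A (Python) =====
-- def get_word_borders(histogram):
--     threshold = max(histogram) / 45
--     border = []
--
--     word = False
--     for index in range(1, len(histogram) - 1):
--         if histogram[index] > threshold:
--             if not word:
--                 border.append(index)
--                 word = True
--
--         elif word:
--             border.append(index)
--             word = False
--
--     return border
-- ===== SOURCE B (Python) =====
-- def get_word_borders(histogram):
--     threshold = max(histogram) / 45
--     n = len(histogram) - 1
--
--     def next_above(i):
--         # first index k with i <= k < n and histogram[k] > threshold (n if none)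
--         while i < n and histogram[i] <= threshold:
--             i += 1
--         return i
--
--     def next_below(i):
--         # first index k with i <= k < n and histogram[k] <= threshold (n if none)
--         while i < n and histogram[i] > threshold:
--             i += 1
--         return i
--
--     border = []
--     i = next_above(1)
--     while i < n:
--         border.append(i)          # word start
--         j = next_below(i + 1)
--         if j >= n:
--             break                 # trailing word is never closed, as in A
--         border.append(j)          # word end
--         i = next_above(j + 1)
--     return border
-- ===== Notes on version B (the rewrite author's own statement) =====
-- stated objective: alternative
-- what changed: Replaced A's per-index toggle scan with a run-skipping search that alternately jumps to the next index above the threshold (word start) and the next index back below it (word end), one outer iteration per word.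
import Mathlib
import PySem

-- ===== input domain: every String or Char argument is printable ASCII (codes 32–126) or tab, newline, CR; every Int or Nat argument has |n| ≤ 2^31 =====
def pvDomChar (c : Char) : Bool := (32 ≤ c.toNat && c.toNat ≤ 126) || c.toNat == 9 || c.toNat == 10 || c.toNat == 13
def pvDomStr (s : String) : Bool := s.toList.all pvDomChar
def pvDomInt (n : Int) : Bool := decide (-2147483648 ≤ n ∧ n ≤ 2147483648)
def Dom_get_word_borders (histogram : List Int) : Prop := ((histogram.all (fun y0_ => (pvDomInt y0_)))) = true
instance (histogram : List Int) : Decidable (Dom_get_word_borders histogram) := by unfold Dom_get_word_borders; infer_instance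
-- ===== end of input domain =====

-- B replaces A's per-index stateful toggle with a run-skipping search: it alternately jumps to the
-- next index above the threshold (word start) and the next index back below it (word end), one loop
-- iteration per word instead of per index (alternative decomposition, same asymptotic cost).
-- Python compares histogram[index] > max/45 in float; on Dom (|values| ≤ 2^31) that float comparison
-- is exactly the integer comparison 45 * histogram[index] > max, which is how both ports state it.

-- ===== PORT A =====
def get_word_borders (histogram : List Int) : List Int :=
  let mx := (PySem.List.max? histogram (fun y => y)).getD 0
  ((PySem.List.pyRange 1 (PySem.List.len histogram - 1) 1).foldl
    (fun st index =>
      if 45 * PySem.List.pyGetD histogram index 0 > mx then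
        if st.2 = false then (st.1 ++ [index], true) else st
      else if st.2 = true then (st.1 ++ [index], false) else st)
    (([] : List Int), false)).1

-- ===== PORT B =====
-- The while-loops of Source B are ported with a Nat fuel equal to the remaining index budget
-- (a totality guard only: with this fuel the guard never cuts the loop short).

-- next_above: first index k with i <= k < n and histogram[k] > threshold (n if none)
def gwbNextAboveF (hist : List Int) (mx n : Int) : Nat -> Int -> Int
  | 0, i => i
  | fuel + 1, i =>
    if i < n ∧ ¬ (45 * PySem.List.pyGetD hist i 0 > mx) then
      gwbNextAboveF hist mx n fuel (i + 1)
    else i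

def gwbNextAbove (hist : List Int) (mx n i : Int) : Int :=
  gwbNextAboveF hist mx n (n - i).toNat i

-- next_below: first index k with i <= k < n and histogram[k] <= threshold (n if none)
def gwbNextBelowF (hist : List Int) (mx n : Int) : Nat -> Int -> Int
  | 0, i => i
  | fuel + 1, i =>
    if i < n ∧ 45 * PySem.List.pyGetD hist i 0 > mx then
      gwbNextBelowF hist mx n fuel (i + 1)
    else i

def gwbNextBelow (hist : List Int) (mx n i : Int) : Int :=
  gwbNextBelowF hist mx n (n - i).toNat i

-- B's main loop: i is a word start (i < n); emit it, find the word's end, emit it, jump to the next start.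
def gwbLoopF (hist : List Int) (mx n : Int) : Nat -> Int -> List Int
  | 0, _ => []
  | fuel + 1, i =>
    if i < n then
      if gwbNextBelow hist mx n (i + 1) ≥ n then [i]
      else i :: gwbNextBelow hist mx n (i + 1) ::
        gwbLoopF hist mx n fuel (gwbNextAbove hist mx n (gwbNextBelow hist mx n (i + 1) + 1))
    else []

def gwbLoop (hist : List Int) (mx n i : Int) : List Int :=
  gwbLoopF hist mx n (n - i).toNat i

def get_word_borders_alt (histogram : List Int) : List Int :=
  let mx := (PySem.List.max? histogram (fun y => y)).getD 0
  let n := PySem.List.len histogram - 1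
  gwbLoop histogram mx n (gwbNextAbove histogram mx n 1)

-- ===== PRECONDITION & SPEC =====
-- Pre_ excludes only the empty list, on which A raises ValueError (max of empty sequence); B raises there too.
def Pre_get_word_borders (histogram : List Int) : Prop := histogram ≠ []
instance (histogram : List Int) : Decidable (Pre_get_word_borders histogram) := by unfold Pre_get_word_borders; infer_instance
def pvWitness_get_word_borders : List Int := [0, 90, 90, 0, 90, 0]

def Spec_get_word_borders (histogram : List Int) (out : List Int) : Prop := out = get_word_borders_alt histogram
instance (histogram : List Int) (out : List Int) : Decidable (Spec_get_word_borders histogram out) := by unfold Spec_get_word_borders; infer_instance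

-- ===== CLAIM (what is proved, stated in full; the proofs are below) =====
def Claim_equal_get_word_borders : Prop := ∀ (histogram : List Int), Dom_get_word_borders histogram → Pre_get_word_borders histogram → Spec_get_word_borders histogram (get_word_borders histogram)

-- ===== LEMMAS AND PROOFS =====

-- Reference form (proof-only): the list of threshold-crossing indices from i with previous state prev.
def pvEdgesI (hist : List Int) (mx n : Int) (prev : Bool) (i : Int) : List Int :=
  if _h : i < n then
    if decide (45 * PySem.List.pyGetD hist i 0 > mx) ≠ prev then
      i :: pvEdgesI hist mx n (decide (45 * PySem.List.pyGetD hist i 0 > mx)) (i + 1)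
    else pvEdgesI hist mx n (decide (45 * PySem.List.pyGetD hist i 0 > mx)) (i + 1)
  else []
termination_by (n - i).toNat
decreasing_by all_goals omega

-- Final state of the toggle after scanning from i.
def pvFinalI (hist : List Int) (mx n : Int) (prev : Bool) (i : Int) : Bool :=
  if _h : i < n then pvFinalI hist mx n (decide (45 * PySem.List.pyGetD hist i 0 > mx)) (i + 1)
  else prev
termination_by (n - i).toNat
decreasing_by omega

-- one-step unfolding lemmas (rewriting with the raw equations over-unfolds the recursive occurrences)
theorem pvEdgesI_lt (hist : List Int) (mx n : Int) (prev : Bool) (i : Int) (h : i < n) :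
    pvEdgesI hist mx n prev i =
      if decide (45 * PySem.List.pyGetD hist i 0 > mx) ≠ prev then
        i :: pvEdgesI hist mx n (decide (45 * PySem.List.pyGetD hist i 0 > mx)) (i + 1)
      else pvEdgesI hist mx n (decide (45 * PySem.List.pyGetD hist i 0 > mx)) (i + 1) := by
  conv_lhs => rw [pvEdgesI]
  rw [dif_pos h]

theorem pvEdgesI_ge (hist : List Int) (mx n : Int) (prev : Bool) (i : Int) (h : ¬ i < n) :
    pvEdgesI hist mx n prev i = [] := by
  rw [pvEdgesI, dif_neg h]

theorem pvFinalI_lt (hist : List Int) (mx n : Int) (prev : Bool) (i : Int) (h : i < n) :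
    pvFinalI hist mx n prev i
      = pvFinalI hist mx n (decide (45 * PySem.List.pyGetD hist i 0 > mx)) (i + 1) := by
  conv_lhs => rw [pvFinalI]
  rw [dif_pos h]

theorem pvFinalI_ge (hist : List Int) (mx n : Int) (prev : Bool) (i : Int) (h : ¬ i < n) :
    pvFinalI hist mx n prev i = prev := by
  rw [pvFinalI, dif_neg h]

-- fuel-version ge and step/stop lemmas
theorem gwbNextAboveF_ge (hist : List Int) (mx n : Int) :
    ∀ (fuel : Nat) (i : Int), i ≤ gwbNextAboveF hist mx n fuel i
  | 0, i => le_refl i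
  | fuel + 1, i => by
    simp only [gwbNextAboveF]
    split
    · have := gwbNextAboveF_ge hist mx n fuel (i + 1); omega
    · omega

theorem gwbNextBelowF_ge (hist : List Int) (mx n : Int) :
    ∀ (fuel : Nat) (i : Int), i ≤ gwbNextBelowF hist mx n fuel i
  | 0, i => le_refl i
  | fuel + 1, i => by
    simp only [gwbNextBelowF]
    split
    · have := gwbNextBelowF_ge hist mx n fuel (i + 1); omega
    · omega

theorem gwbNextAbove_ge (hist : List Int) (mx n i : Int) : i ≤ gwbNextAbove hist mx n i :=
  gwbNextAboveF_ge hist mx n _ i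

theorem gwbNextBelow_ge (hist : List Int) (mx n i : Int) : i ≤ gwbNextBelow hist mx n i :=
  gwbNextBelowF_ge hist mx n _ i

theorem gwbNextBelow_step (hist : List Int) (mx n i : Int) (h1 : i < n)
    (hb : 45 * PySem.List.pyGetD hist i 0 > mx) :
    gwbNextBelow hist mx n i = gwbNextBelow hist mx n (i + 1) := by
  unfold gwbNextBelow
  have hm : (n - i).toNat = (n - (i + 1)).toNat + 1 := by omega
  rw [hm]
  simp only [gwbNextBelowF]
  rw [if_pos ⟨h1, hb⟩]

theorem gwbNextBelow_stop (hist : List Int) (mx n i : Int)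
    (h : ¬ (i < n ∧ 45 * PySem.List.pyGetD hist i 0 > mx)) :
    gwbNextBelow hist mx n i = i := by
  unfold gwbNextBelow
  cases hm : (n - i).toNat with
  | zero => rfl
  | succ k => simp only [gwbNextBelowF]; rw [if_neg h]

theorem gwbNextAbove_step (hist : List Int) (mx n i : Int) (h1 : i < n)
    (hb : ¬ 45 * PySem.List.pyGetD hist i 0 > mx) :
    gwbNextAbove hist mx n i = gwbNextAbove hist mx n (i + 1) := by
  unfold gwbNextAbove
  have hm : (n - i).toNat = (n - (i + 1)).toNat + 1 := by omega
  rw [hm]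
  simp only [gwbNextAboveF]
  rw [if_pos ⟨h1, hb⟩]

theorem gwbNextAbove_stop (hist : List Int) (mx n i : Int)
    (h : ¬ (i < n ∧ ¬ 45 * PySem.List.pyGetD hist i 0 > mx)) :
    gwbNextAbove hist mx n i = i := by
  unfold gwbNextAbove
  cases hm : (n - i).toNat with
  | zero => rfl
  | succ k => simp only [gwbNextAboveF]; rw [if_neg h]

-- any sufficient fuel computes gwbLoop (fuel irrelevance)
theorem gwbLoopF_fuel (hist : List Int) (mx n : Int) (fuel : Nat) :
    ∀ (i : Int), (n - i).toNat ≤ fuel → gwbLoopF hist mx n fuel i = gwbLoop hist mx n i := by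
  induction fuel using Nat.strong_induction_on with
  | _ fuel ih =>
    intro i hle
    unfold gwbLoop
    by_cases h1 : i < n
    · obtain ⟨f', rfl⟩ : ∃ f', fuel = f' + 1 := ⟨fuel - 1, by omega⟩
      have hm : (n - i).toNat = ((n - i).toNat - 1) + 1 := by omega
      rw [hm]
      simp only [gwbLoopF]
      by_cases hj : gwbNextBelow hist mx n (i + 1) ≥ n
      · simp [h1, hj]
      · have hgb := gwbNextBelow_ge hist mx n (i + 1)
        have hga := gwbNextAbove_ge hist mx n (gwbNextBelow hist mx n (i + 1) + 1)
        have hsz : (n - gwbNextAbove hist mx n (gwbNextBelow hist mx n (i + 1) + 1)).toNat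
            ≤ (n - i).toNat - 1 := by omega
        rw [ih f' (by omega) _ (by omega),
          ih ((n - i).toNat - 1) (by omega) _ hsz]
    · have h0 : (n - i).toNat = 0 := by omega
      rw [h0]
      cases fuel with
      | zero => rfl
      | succ f => simp only [gwbLoopF]; rw [if_neg h1]

theorem gwbLoop_lt (hist : List Int) (mx n i : Int) (h : i < n) :
    gwbLoop hist mx n i =
      if gwbNextBelow hist mx n (i + 1) ≥ n then [i]
      else i :: gwbNextBelow hist mx n (i + 1) ::
        gwbLoop hist mx n (gwbNextAbove hist mx n (gwbNextBelow hist mx n (i + 1) + 1)) := by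
  conv_lhs => rw [gwbLoop]
  have hm : (n - i).toNat = ((n - i).toNat - 1) + 1 := by omega
  rw [hm]
  simp only [gwbLoopF]
  by_cases hj : gwbNextBelow hist mx n (i + 1) ≥ n
  · simp [h, hj]
  · have hgb := gwbNextBelow_ge hist mx n (i + 1)
    have hga := gwbNextAbove_ge hist mx n (gwbNextBelow hist mx n (i + 1) + 1)
    rw [gwbLoopF_fuel hist mx n ((n - i).toNat - 1) _ (by omega)]
    simp [h, hj]

theorem gwbLoop_ge (hist : List Int) (mx n i : Int) (h : ¬ i < n) :
    gwbLoop hist mx n i = [] := by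
  unfold gwbLoop
  have h0 : (n - i).toNat = 0 := by omega
  rw [h0]
  rfl

-- A's foldl computes pvEdgesI (with final toggle state pvFinalI).
theorem pv_A_edges (hist : List Int) (mx n : Int) (a : Int) (acc : List Int) (w : Bool) :
    (PySem.List.pyRange a n 1).foldl
      (fun st index =>
        if 45 * PySem.List.pyGetD hist index 0 > mx then
          if st.2 = false then (st.1 ++ [index], true) else st
        else if st.2 = true then (st.1 ++ [index], false) else st)
      (acc, w)
    = (acc ++ pvEdgesI hist mx n w a, pvFinalI hist mx n w a) := by
  by_cases h : a < n
  · rw [PySem.List.pyRange_one_cons h, List.foldl_cons]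
    have hstep : (if 45 * PySem.List.pyGetD hist a 0 > mx then
          if w = false then (acc ++ [a], true) else (acc, w)
        else if w = true then (acc ++ [a], false) else (acc, w))
        = ((if decide (45 * PySem.List.pyGetD hist a 0 > mx) ≠ w then acc ++ [a] else acc),
           decide (45 * PySem.List.pyGetD hist a 0 > mx)) := by
      by_cases hb : 45 * PySem.List.pyGetD hist a 0 > mx <;> cases w <;> simp [hb]
    dsimp only
    rw [hstep, pv_A_edges hist mx n (a + 1), pvEdgesI_lt hist mx n w a h, pvFinalI_lt hist mx n w a h]
    by_cases hb : decide (45 * PySem.List.pyGetD hist a 0 > mx) ≠ w <;> simp [hb]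
  · rw [PySem.List.pyRange_one_eq_nil (by omega), pvEdgesI_ge hist mx n w a h,
      pvFinalI_ge hist mx n w a h]
    simp
termination_by (n - a).toNat
decreasing_by omega

-- pvEdgesI with state true = scan to the next below-threshold index, emit it, back to state false.
theorem pv_edges_true (hist : List Int) (mx n i : Int) :
    pvEdgesI hist mx n true i =
      if gwbNextBelow hist mx n i ≥ n then []
      else gwbNextBelow hist mx n i :: pvEdgesI hist mx n false (gwbNextBelow hist mx n i + 1) := by
  by_cases h1 : i < n
  · by_cases hb : 45 * PySem.List.pyGetD hist i 0 > mx
    · rw [pvEdgesI_lt hist mx n true i h1, decide_eq_true hb, if_neg (by simp),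
        gwbNextBelow_step hist mx n i h1 hb]
      exact pv_edges_true hist mx n (i + 1)
    · rw [pvEdgesI_lt hist mx n true i h1, decide_eq_false hb, if_pos (by simp),
        gwbNextBelow_stop hist mx n i (by tauto), if_neg (by omega)]
  · rw [pvEdgesI_ge hist mx n true i h1, gwbNextBelow_stop hist mx n i (by tauto),
      if_pos (by omega)]
termination_by (n - i).toNat
decreasing_by omega

-- pvEdgesI with state false = B's loop started at the next above-threshold index.
theorem pv_edges_false (hist : List Int) (mx n i : Int) :
    pvEdgesI hist mx n false i = gwbLoop hist mx n (gwbNextAbove hist mx n i) := by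
  by_cases h1 : i < n
  · by_cases hb : 45 * PySem.List.pyGetD hist i 0 > mx
    · rw [pvEdgesI_lt hist mx n false i h1, decide_eq_true hb, if_pos (by simp),
        gwbNextAbove_stop hist mx n i (by tauto), gwbLoop_lt hist mx n i h1,
        pv_edges_true hist mx n (i + 1)]
      by_cases hj : gwbNextBelow hist mx n (i + 1) ≥ n
      · rw [if_pos hj, if_pos hj]
      · rw [if_neg hj, if_neg hj,
          pv_edges_false hist mx n (gwbNextBelow hist mx n (i + 1) + 1)]
    · rw [pvEdgesI_lt hist mx n false i h1, decide_eq_false hb, if_neg (by simp),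
        gwbNextAbove_step hist mx n i h1 hb]
      exact pv_edges_false hist mx n (i + 1)
  · rw [pvEdgesI_ge hist mx n false i h1, gwbNextAbove_stop hist mx n i (by tauto),
      gwbLoop_ge hist mx n i h1]
termination_by (n - i).toNat
decreasing_by all_goals (have := gwbNextBelow_ge hist mx n (i + 1); omega)

-- ===== VERDICT (by name: the statement is the Claim_ definition above) =====
theorem get_word_borders_spec : Claim_equal_get_word_borders := by
  intro histogram _ _
  unfold Spec_get_word_borders get_word_borders get_word_borders_alt
  dsimp only
  rw [pv_A_edges, pv_edges_false]
  simp
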